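-- pv_equiv track=rewrite | github.com/prochot/L5K-Tuner | L5KTuner/utils.py | paren_delta
-- ===== SOURCE A (Python) =====
-- def paren_delta(line: str) -> int:
--     """Return net '(' - ')' on this line, ignoring parentheses inside strings."""
--     delta = 0
--     in_str = False
--     esc = False
--     for ch in line:
--         if in_str:
--             if esc:
--                 esc = False
--             elif ch == '\\':
--                 esc = True
--             elif ch == '"':
--                 in_str = False
--             continue
--         else:
--             if ch == '"':
--                 in_str = True
--             elif ch == '(':
--                 delta += 1
--             elif ch == ')':
--                 delta -= 1
--     return delta
-- ===== SOURCE B (Python) =====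
-- def paren_delta(line: str) -> int:
--     """Return net '(' - ')' on this line, ignoring parentheses inside strings.
--
--     Two-phase: first collect the characters that lie outside string literals
--     (a nested loop skips each quoted literal, honoring backslash escapes),
--     then count parentheses in the cleaned character list.
--     """
--     cleaned = []
--     i, n = 0, len(line)
--     while i < n:
--         ch = line[i]
--         i += 1
--         if ch == '"':
--             # skip the string literal
--             while i < n:
--                 c = line[i]
--                 i += 1
--                 if c == '\\':
--                     i += 1          # skip the escaped character
--                 elif c == '"':
--                     break
--         else:
--             cleaned.append(ch)
--     return cleaned.count('(') - cleaned.count(')')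
-- ===== Notes on version B (the rewrite author's own statement) =====
-- stated objective: alternative
-- what changed: B separates the work into a cleaning pass that skips quoted string literals (a nested inner loop instead of in_str/esc boolean state) producing the list of out-of-string characters, then counts '(' and ')' with list.count; A fuses everything into one flag-driven state machine.
import Mathlib
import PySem

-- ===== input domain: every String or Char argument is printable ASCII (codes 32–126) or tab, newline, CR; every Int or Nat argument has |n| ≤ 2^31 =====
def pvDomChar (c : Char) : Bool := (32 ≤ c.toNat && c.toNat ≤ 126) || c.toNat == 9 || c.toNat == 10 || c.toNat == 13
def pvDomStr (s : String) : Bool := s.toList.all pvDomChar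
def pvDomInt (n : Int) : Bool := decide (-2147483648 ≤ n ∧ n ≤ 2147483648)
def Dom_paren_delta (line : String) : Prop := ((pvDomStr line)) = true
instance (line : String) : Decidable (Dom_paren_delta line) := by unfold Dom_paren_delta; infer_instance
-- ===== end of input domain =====

-- B splits A's fused flag-driven state machine into a string-stripping pass plus two parenthesis counts (alternative decomposition, same cost).


-- ===== PORT A =====
-- one step of A's for-loop: state = (delta, in_str, esc)
def parenStepA (st : Int × Bool × Bool) (ch : Char) : Int × Bool × Bool :=
  let (delta, in_str, esc) := st
  if in_str then
    if esc then (delta, true, false)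
    else if ch = '\\' then (delta, true, true)
    else if ch = '"' then (delta, false, false)
    else (delta, true, false)
  else
    if ch = '"' then (delta, true, false)
    else if ch = '(' then (delta + 1, false, false)
    else if ch = ')' then (delta - 1, false, false)
    else (delta, false, false)

def paren_delta (line : String) : Int :=
  (line.toList.foldl parenStepA (0, false, false)).1

-- ===== PORT B =====
-- the inner 'skip the string literal' loop: consumes up to the closing quote
def skipStr : List Char → List Char
  | [] => []
  | c :: rest =>
    if c = '\\' then skipStr rest.tail
    else if c = '"' then rest
    else skipStr rest
termination_by l => l.length
decreasing_by
  all_goals simp only [List.length_tail, List.length_cons]; omega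

theorem skipStr_length_le (l : List Char) : (skipStr l).length ≤ l.length := by
  induction hn : l.length using Nat.strong_induction_on generalizing l with
  | _ n ih =>
    cases l with
    | nil => simp [skipStr]
    | cons c rest =>
      subst hn
      by_cases hb : c = '\\'
      · rw [skipStr, if_pos hb]
        have h1 := ih rest.tail.length (by simp only [List.length_tail, List.length_cons]; omega) rest.tail rfl
        simp only [List.length_tail, List.length_cons] at *
        omega
      · by_cases hq : c = '"'
        · rw [skipStr, if_neg hb, if_pos hq]; simp
        · rw [skipStr, if_neg hb, if_neg hq]
          have h1 := ih rest.length (by simp) rest rfl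
          simp only [List.length_cons]; omega

-- the outer loop: the characters of the line lying outside string literals
def cleanStr : List Char → List Char
  | [] => []
  | c :: rest =>
    if c = '"' then cleanStr (skipStr rest)
    else c :: cleanStr rest
termination_by l => l.length
decreasing_by
  · have := skipStr_length_le rest; simp only [List.length_cons]; omega
  · simp only [List.length_cons]; omega

def paren_delta_alt (line : String) : Int :=
  let cleaned := cleanStr line.toList
  (cleaned.count '(' : Int) - (cleaned.count ')' : Int)

-- ===== PRECONDITION & SPEC =====
def Spec_paren_delta (line : String) (out : Int) : Prop := out = paren_delta_alt line
instance (line : String) (out : Int) : Decidable (Spec_paren_delta line out) := by unfold Spec_paren_delta; infer_instance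

-- ===== CLAIM (what is proved, stated in full; the proofs are below) =====
def Claim_equal_paren_delta : Prop := ∀ (line : String), Dom_paren_delta line → Spec_paren_delta line (paren_delta line)

-- ===== LEMMAS AND PROOFS =====

-- A's fold started in in-string state (esc = false) behaves like first discarding
-- the rest of the string literal with skipStr, then continuing outside a string.
theorem foldl_instr (l : List Char) (d : Int) :
    (l.foldl parenStepA (d, true, false)).1
      = ((skipStr l).foldl parenStepA (d, false, false)).1 := by
  induction hn : l.length using Nat.strong_induction_on generalizing l d with
  | _ n ih =>
    cases l with
    | nil => simp [skipStr]
    | cons c rest =>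
      subst hn
      by_cases hb : c = '\\'
      · subst hb
        rw [skipStr, if_pos rfl, List.foldl_cons]
        have hstep : parenStepA (d, true, false) '\\' = (d, true, true) := by
          simp [parenStepA]
        rw [hstep]
        cases rest with
        | nil => simp [skipStr]
        | cons c2 r2 =>
          rw [List.foldl_cons]
          have hstep2 : parenStepA (d, true, true) c2 = (d, true, false) := by
            simp [parenStepA]
          rw [hstep2]
          exact ih r2.length (by simp) r2 d rfl
      · by_cases hq : c = '"'
        · subst hq
          rw [skipStr, if_neg hb, if_pos rfl, List.foldl_cons]
          have hstep : parenStepA (d, true, false) '"' = (d, false, false) := by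
            simp [parenStepA]
          rw [hstep]
        · rw [skipStr, if_neg hb, if_neg hq, List.foldl_cons]
          have hstep : parenStepA (d, true, false) c = (d, true, false) := by
            simp [parenStepA, hb, hq]
          rw [hstep]
          exact ih rest.length (by simp) rest d rfl

-- A's fold in the outside-string state computes d + count '(' - count ')' of the cleaned list.
theorem foldl_outstr (l : List Char) (d : Int) :
    (l.foldl parenStepA (d, false, false)).1
      = d + ((cleanStr l).count '(' : Int) - ((cleanStr l).count ')' : Int) := by
  induction hn : l.length using Nat.strong_induction_on generalizing l d with
  | _ n ih =>
    cases l with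
    | nil => simp [cleanStr]
    | cons c rest =>
      subst hn
      by_cases hq : c = '"'
      · subst hq
        rw [List.foldl_cons]
        have hstep : parenStepA (d, false, false) '"' = (d, true, false) := by
          simp [parenStepA]
        rw [hstep, foldl_instr,
          ih (skipStr rest).length (by have := skipStr_length_le rest; simp; omega) _ d rfl]
        simp [cleanStr]
      · by_cases ho : c = '('
        · subst ho
          rw [List.foldl_cons]
          have hstep : parenStepA (d, false, false) '(' = (d + 1, false, false) := by
            simp [parenStepA]
          rw [hstep, ih rest.length (by simp) rest (d + 1) rfl]
          simp [cleanStr]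
          omega
        · by_cases hc : c = ')'
          · subst hc
            rw [List.foldl_cons]
            have hstep : parenStepA (d, false, false) ')' = (d - 1, false, false) := by
              simp [parenStepA]
            rw [hstep, ih rest.length (by simp) rest (d - 1) rfl]
            simp [cleanStr]
            omega
          · rw [List.foldl_cons]
            have hstep : parenStepA (d, false, false) c = (d, false, false) := by
              simp [parenStepA, hq, ho, hc]
            rw [hstep, ih rest.length (by simp) rest d rfl]
            simp [cleanStr, hq, ho, hc]

-- ===== VERDICT (by name: the statement is the Claim_ definition above) =====
theorem paren_delta_spec : Claim_equal_paren_delta := by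
  intro line _
  unfold Spec_paren_delta paren_delta paren_delta_alt
  simpa using foldl_outstr line.toList 0
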